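-- pv_equiv track=rewrite | github.com/AI-Tech-7th-NLP-15/Daily-PS | Jungmin/Week04/신고 결과 받기.py | solution
-- ===== SOURCE A (Python) =====
-- def solution(id_list, report, k):
--     answer = []
--     mapper_ed = {}
--     mapper_er = {}
--
--     report = list(set(report))
--
--     for log in report:
--         reporter, reported = log.split(' ')
--         if reported not in mapper_ed:
--             mapper_ed[reported] = [1, [reporter]]
--
--         else:
--             mapper_ed[reported][0] += 1
--             mapper_ed[reported][1].append(reporter)
--
--         if mapper_ed[reported][0] == k:
--             for rep in mapper_ed[reported][1]:
--                 if rep not in mapper_er: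
--                     mapper_er[rep] = 1
--
--                 else:
--                     mapper_er[rep] += 1
--
--         elif mapper_ed[reported][0] > k:
--             if reporter not in mapper_er:
--                 mapper_er[reporter] = 1
--
--             else:
--                 mapper_er[reporter] += 1
--
--     for id in id_list:
--         answer.append(mapper_er[id]) if id in mapper_er else answer.append(0)
--
--     return answer
-- ===== SOURCE B (Python) =====
-- def solution(id_list, report, k):
--     # two-phase: build the full reported -> {reporters} index, then aggregate
--     index = {}
--     for log in set(report):
--         reporter, reported = log.split(' ')
--         index.setdefault(reported, set()).add(reporter)
--     counts = {}
--     for reporters in index.values():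
--         if len(reporters) >= k:
--             for reporter in reporters:
--                 counts[reporter] = counts.get(reporter, 0) + 1
--     return [counts.get(i, 0) for i in id_list]
-- ===== Notes on version B (the rewrite author's own statement) =====
-- stated objective: simpler
-- what changed: Replaced A's online threshold-crossing accumulation (per-user counter plus reporter list, credited the moment the count hits k and incrementally afterwards) by two plain phases: build the complete reported->set-of-reporters index, then credit every reporter of each user whose distinct-reporter set has size >= k.
import Mathlib
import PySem

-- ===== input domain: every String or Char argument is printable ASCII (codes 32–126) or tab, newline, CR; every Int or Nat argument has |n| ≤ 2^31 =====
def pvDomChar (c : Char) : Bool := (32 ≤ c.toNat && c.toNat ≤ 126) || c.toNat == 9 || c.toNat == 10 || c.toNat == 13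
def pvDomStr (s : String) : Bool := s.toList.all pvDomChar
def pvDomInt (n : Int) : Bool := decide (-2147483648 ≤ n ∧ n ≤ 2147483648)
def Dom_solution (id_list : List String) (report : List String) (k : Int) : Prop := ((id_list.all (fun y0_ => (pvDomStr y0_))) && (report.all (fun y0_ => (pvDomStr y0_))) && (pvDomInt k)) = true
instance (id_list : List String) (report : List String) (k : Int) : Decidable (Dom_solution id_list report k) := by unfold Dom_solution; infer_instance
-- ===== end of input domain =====

-- B replaces A's online threshold-crossing accumulation by two plain phases (full
-- reported -> reporters index first, then one aggregation pass); objective: simpler.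

-- ===== PORT A =====
-- reporter, reported = log.split(' ')  (shared by both ports; the defaults are never
-- reached under Pre_solution, which guarantees the split has exactly two fields)
def pvParse (log : String) : String × String :=
  let parts := (PySem.Str.split? log " ").getD []
  (parts.getD 0 "", parts.getD 1 "")

-- the mapper_er credit: if rep not in mapper_er: mapper_er[rep] = 1 else: += 1
def pvCreditA (er : PySem.Dict String Int) (rep : String) : PySem.Dict String Int :=
  if er.contains rep = false then er.insert rep 1 else er.modify rep 0 (fun x => x + 1)

-- one iteration of A's main loop, on the parsed pair p = (reporter, reported)
def pvStepP (k : Int) (st : PySem.Dict String (Int × List String) × PySem.Dict String Int)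
    (p : String × String) : PySem.Dict String (Int × List String) × PySem.Dict String Int :=
  let ed' := if st.1.contains p.2 = false then st.1.insert p.2 (1, [p.1])
             else st.1.modify p.2 (0, []) (fun q => (q.1 + 1, q.2 ++ [p.1]))
  let cur := ed'.getD p.2 (0, [])
  let er' := if cur.1 = k then cur.2.foldl pvCreditA st.2
             else if k < cur.1 then pvCreditA st.2 p.1
             else st.2
  (ed', er')

def pvStepA (k : Int) (st : PySem.Dict String (Int × List String) × PySem.Dict String Int)
    (log : String) : PySem.Dict String (Int × List String) × PySem.Dict String Int :=
  pvStepP k st (pvParse log)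

def solution (id_list : List String) (report : List String) (k : Int) : List Int :=
  let reportL := PySem.Set.ofList report
  let st := reportL.foldl (pvStepA k) (PySem.Dict.empty, PySem.Dict.empty)
  id_list.map (fun id => if st.2.contains id = true then st.2.getD id 0 else 0)

-- ===== PORT B =====
def solution_alt (id_list : List String) (report : List String) (k : Int) : List Int :=
  let index := (PySem.Set.ofList report).foldl
    (fun d log => d.modify (pvParse log).2 PySem.Set.empty
      (fun s => PySem.Set.add s (pvParse log).1)) PySem.Dict.empty
  let counts := index.values.foldl
    (fun c reporters =>
      if k ≤ PySem.Set.len reporters then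
        reporters.foldl (fun c reporter => c.insert reporter (c.getD reporter 0 + 1)) c
      else c) PySem.Dict.empty
  id_list.map (fun i => counts.getD i 0)

-- ===== PRECONDITION & SPEC =====
-- Pre_ excludes exactly the inputs where A raises ValueError: some log in report
-- that does not split on a single space into exactly two fields.
def Pre_solution (id_list : List String) (report : List String) (k : Int) : Prop :=
  report.all (fun log => ((PySem.Str.split? log " ").getD []).length == 2) = true
instance (id_list : List String) (report : List String) (k : Int) : Decidable (Pre_solution id_list report k) := by unfold Pre_solution; infer_instance
def pvWitness_solution : List String × List String × Int := (["muzi", "frodo"], ["muzi frodo", "apeach frodo"], 2)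

def Spec_solution (id_list : List String) (report : List String) (k : Int) (out : List Int) : Prop := out = solution_alt id_list report k
instance (id_list : List String) (report : List String) (k : Int) (out : List Int) : Decidable (Spec_solution id_list report k out) := by unfold Spec_solution; infer_instance

-- ===== CLAIM (what is proved, stated in full; the proofs are below) =====
def Claim_equal_solution : Prop := ∀ (id_list : List String) (report : List String) (k : Int), Dom_solution id_list report k → Pre_solution id_list report k → Spec_solution id_list report k (solution id_list report k)

-- ===== LEMMAS AND PROOFS =====

-- number of (distinct) logs reporting u
def pvCntU (M : List (String × String)) (u : String) : Nat := M.countP (fun q => q.2 == u)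
-- the reporters of u, in log order
def pvReps (M : List (String × String)) (u : String) : List String :=
  (M.filter (fun q => q.2 == u)).map Prod.fst
-- the common value both programs compute for id x: the number of (reporter = x,
-- reported = u) pairs among the distinct logs such that u was reported ≥ k times
def pvCnt (M : List (String × String)) (k : Int) (x : String) : Nat :=
  M.countP (fun p => p.1 == x && decide (k ≤ (pvCntU M p.2 : Int)))

theorem countP_or_disjoint {α : Type} (p q : α → Bool) (l : List α)
    (h : ∀ a ∈ l, ¬(p a = true ∧ q a = true)) :
    l.countP (fun a => p a || q a) = l.countP p + l.countP q := by
  induction l with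
  | nil => simp
  | cons a l ih =>
    have ha := h a (by simp)
    have ih' := ih (fun b hb => h b (by simp [hb]))
    by_cases hp : p a = true <;> by_cases hq : q a = true
    · exact absurd ⟨hp, hq⟩ ha
    all_goals simp [hp, hq, ih']; try omega

theorem count_reps (M : List (String × String)) (u x : String) :
    (pvReps M u).count x = M.countP (fun q => q.1 == x && q.2 == u) := by
  rw [pvReps, List.count_eq_countP, List.countP_map, List.countP_filter]
  rfl

theorem cntU_append (M : List (String × String)) (r u0 u : String) :
    pvCntU (M ++ [(r, u0)]) u = pvCntU M u + (if u0 = u then 1 else 0) := by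
  rw [pvCntU, pvCntU, List.countP_append, List.countP_cons]
  simp [beq_iff_eq]

theorem cntU_append_int (M : List (String × String)) (r u0 u : String) :
    ((pvCntU (M ++ [(r, u0)]) u : Nat) : Int) = (pvCntU M u : Int) + (if u0 = u then 1 else 0) := by
  rw [cntU_append]; by_cases h : u0 = u <;> simp [h]

theorem cnt_step (M : List (String × String)) (r u0 : String) (k : Int) (x : String) :
    pvCnt (M ++ [(r, u0)]) k x =
      if k = (pvCntU M u0 : Int) + 1 then pvCnt M k x + (pvReps (M ++ [(r, u0)]) u0).count x
      else if k ≤ (pvCntU M u0 : Int) then pvCnt M k x + (if r = x then 1 else 0)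
      else pvCnt M k x := by
  have hsplit : pvCnt (M ++ [(r, u0)]) k x
      = List.countP (fun p => p.1 == x && decide (k ≤ (pvCntU M p.2 : Int) + (if u0 = p.2 then 1 else 0))) M
        + (if (r == x && decide (k ≤ (pvCntU M u0 : Int) + 1)) = true then 1 else 0) := by
    rw [pvCnt, List.countP_append, List.countP_cons, List.countP_nil]
    congr 1
    · apply List.countP_congr; intro p hp
      simp [cntU_append_int]
    · simp [cntU_append_int]
  rw [hsplit]
  have hcount_reps' : (pvReps (M ++ [(r, u0)]) u0).count x
      = List.countP (fun q => q.1 == x && q.2 == u0) M + (if r = x then 1 else 0) := by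
    rw [count_reps, List.countP_append, List.countP_cons, List.countP_nil]
    by_cases hx : r = x <;> simp [hx]
  by_cases h1 : k = (pvCntU M u0 : Int) + 1
  · rw [if_pos h1]
    have htail : (if (r == x && decide (k ≤ (pvCntU M u0 : Int) + 1)) = true then 1 else 0)
        = (if r = x then 1 else 0) := by
      have : k ≤ (pvCntU M u0 : Int) + 1 := le_of_eq h1
      by_cases hx : r = x <;> simp [hx, this]
    have hhead : List.countP (fun p => p.1 == x && decide (k ≤ (pvCntU M p.2 : Int) + (if u0 = p.2 then 1 else 0))) M
        = pvCnt M k x + List.countP (fun q => q.1 == x && q.2 == u0) M := by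
      rw [pvCnt, ← countP_or_disjoint]
      · apply List.countP_congr; intro p hp
        by_cases hu : u0 = p.2
        · have h1' : k = (pvCntU M p.2 : Int) + 1 := by rw [← hu]; exact h1
          have hk1 : k ≤ (pvCntU M p.2 : Int) + 1 := le_of_eq h1'
          have hk2 : ¬ k ≤ (pvCntU M p.2 : Int) := by omega
          by_cases hx : p.1 = x <;> simp [hx, hk1, hk2, hu]
        · have : (p.2 == u0) = false := by simpa using fun hh => hu hh.symm
          simp [if_neg hu, this]
      · intro p hp hand
        rcases hand with ⟨ha, hb⟩
        simp only [Bool.and_eq_true, beq_iff_eq, decide_eq_true_eq] at ha hb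
        rw [hb.2] at ha
        omega
    rw [htail, hhead, hcount_reps']
    omega
  · have htail' : (if (r == x && decide (k ≤ (pvCntU M u0 : Int) + 1)) = true then 1 else 0)
        = (if (r = x ∧ k ≤ (pvCntU M u0 : Int)) then 1 else 0) := by
      by_cases hx : r = x <;> by_cases hk : k ≤ (pvCntU M u0 : Int)
      all_goals
        have hk1 : (k ≤ (pvCntU M u0 : Int) + 1) ↔ (k ≤ (pvCntU M u0 : Int)) := by omega
        simp [hx, hk, hk1]
    have hhead : List.countP (fun p => p.1 == x && decide (k ≤ (pvCntU M p.2 : Int) + (if u0 = p.2 then 1 else 0))) M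
        = pvCnt M k x := by
      rw [pvCnt]
      apply List.countP_congr; intro p hp
      by_cases hu : u0 = p.2
      · have h1' : k ≠ (pvCntU M p.2 : Int) + 1 := by rw [← hu]; exact h1
        have hk1 : (k ≤ (pvCntU M p.2 : Int) + 1) ↔ (k ≤ (pvCntU M p.2 : Int)) := by omega
        by_cases hx : p.1 = x <;> simp [hx, hk1, hu]
      · simp [if_neg hu]
    rw [htail', hhead, if_neg h1]
    by_cases hk : k ≤ (pvCntU M u0 : Int)
    · by_cases hx : r = x <;> simp [hk, hx]
    · simp [hk]

theorem reps_append (M : List (String × String)) (r u0 u : String) :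
    pvReps (M ++ [(r, u0)]) u = pvReps M u ++ (if u0 = u then [r] else []) := by
  rw [pvReps, pvReps, List.filter_append, List.map_append, List.filter_cons]
  by_cases h : u0 = u <;> simp [h]

theorem creditA_eq : pvCreditA = fun er rep => er.modify rep 0 (fun x => x + 1) := by
  funext er rep
  rw [pvCreditA]
  by_cases h : er.contains rep = false
  · simp [h, PySem.Dict.modify, PySem.Dict.getD_of_not_contains er 0 h]
  · simp [h]

theorem edStep_eq (d : PySem.Dict String (Int × List String)) (r u : String) :
    (if d.contains u = false then d.insert u (1, [r])
     else d.modify u (0, []) (fun q => (q.1 + 1, q.2 ++ [r])))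
    = d.modify u (0, []) (fun q => (q.1 + 1, q.2 ++ [r])) := by
  by_cases h : d.contains u = false
  · simp [h, PySem.Dict.modify, PySem.Dict.getD_of_not_contains d (0, []) h]
  · simp [h]

theorem A_inv (k : Int) (M : List (String × String)) :
    (∀ u, (M.foldl (pvStepP k) (PySem.Dict.empty, PySem.Dict.empty)).1.getD u (0, [])
        = ((pvCntU M u : Int), pvReps M u)) ∧
    (∀ x, (M.foldl (pvStepP k) (PySem.Dict.empty, PySem.Dict.empty)).2.getD x 0
        = (pvCnt M k x : Int)) := by
  induction M using List.reverseRecOn with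
  | nil =>
    constructor <;> intro u <;>
      simp [List.foldl_nil, PySem.Dict.getD_empty, pvCntU, pvReps, pvCnt]
  | append_singleton M p ih =>
    obtain ⟨ihed, iher⟩ := ih
    obtain ⟨r, u0⟩ := p
    rw [List.foldl_append, List.foldl_cons, List.foldl_nil]
    set st := M.foldl (pvStepP k) (PySem.Dict.empty, PySem.Dict.empty) with hst
    rw [pvStepP]
    simp only [edStep_eq]
    have hed' : ∀ u, (st.1.modify u0 (0, []) (fun q => (q.1 + 1, q.2 ++ [r]))).getD u (0, [])
        = ((pvCntU (M ++ [(r, u0)]) u : Int), pvReps (M ++ [(r, u0)]) u) := by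
      intro u
      rw [PySem.Dict.getD_modify]
      by_cases h : u = u0
      · subst h
        rw [if_pos rfl, ihed u, cntU_append, reps_append]
        simp
      · rw [if_neg h, ihed u, cntU_append, reps_append,
          if_neg (fun hh => h hh.symm), if_neg (fun hh => h hh.symm)]
        simp
    refine ⟨hed', ?_⟩
    intro x
    have hcur : (st.1.modify u0 (0, []) (fun q => (q.1 + 1, q.2 ++ [r]))).getD u0 (0, [])
        = ((pvCntU (M ++ [(r, u0)]) u0 : Int), pvReps (M ++ [(r, u0)]) u0) := hed' u0
    rw [hcur]
    have hcntu0 : (pvCntU (M ++ [(r, u0)]) u0 : Int) = (pvCntU M u0 : Int) + 1 := by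
      rw [cntU_append]; simp
    rw [cnt_step]
    by_cases h1 : ((pvCntU (M ++ [(r, u0)]) u0 : Nat) : Int) = k
    · rw [if_pos h1, if_pos (by omega : k = (pvCntU M u0 : Int) + 1)]
      rw [creditA_eq, PySem.Dict.getD_foldl_modify_add_one, iher x]
      push_cast
      ring
    · rw [if_neg h1, if_neg (by omega : ¬ k = (pvCntU M u0 : Int) + 1)]
      by_cases h2 : k < ((pvCntU (M ++ [(r, u0)]) u0 : Nat) : Int)
      · rw [if_pos h2, if_pos (by omega : k ≤ (pvCntU M u0 : Int))]
        rw [creditA_eq]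
        rw [PySem.Dict.getD_modify, iher x]
        by_cases hx : x = r
        · rw [if_pos hx]
          subst hx
          rw [iher x, if_pos rfl]
          push_cast
          ring
        · rw [if_neg hx, if_neg (fun hh => hx hh.symm)]
          simp
      · rw [if_neg h2, if_neg (by omega : ¬ k ≤ (pvCntU M u0 : Int))]
        exact iher x

theorem sum_map_add (U : List String) (f g : String → Int) :
    (U.map (fun u => f u + g u)).sum = (U.map f).sum + (U.map g).sum := by
  induction U with
  | nil => simp
  | cons a U ih => simp [ih]; ring

theorem sum_map_ite_eq (U : List String) (u0 : String) (d : Int)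
    (hU : U.Nodup) (hm : u0 ∈ U) :
    (U.map (fun u => if u = u0 then d else 0)).sum = d := by
  induction U with
  | nil => simp at hm
  | cons a U ih =>
    rw [List.map_cons, List.sum_cons]
    rcases List.mem_cons.mp hm with h | h
    · rw [if_pos h.symm]
      have hz : (U.map (fun u => if u = u0 then d else 0)).sum = 0 := by
        rw [List.sum_eq_zero]
        intro y hy
        rcases List.mem_map.mp hy with ⟨u, hu, huy⟩
        have : u ≠ u0 := fun hh => (List.nodup_cons.mp hU).1 (h ▸ hh ▸ hu)
        rw [← huy, if_neg this]
      rw [hz]; ring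
    · have hne : a ≠ u0 := fun hh => (List.nodup_cons.mp hU).1 (hh ▸ h)
      rw [if_neg hne, ih (List.nodup_cons.mp hU).2 h]
      ring

theorem sum_group (x : String) (C : String → Bool) (M : List (String × String)) (U : List String)
    (hU : U.Nodup) (hcov : ∀ p ∈ M, p.2 ∈ U) :
    (U.map (fun u => if C u = true then ((pvReps M u).count x : Int) else 0)).sum
      = (M.countP (fun p => p.1 == x && C p.2) : Int) := by
  induction M using List.reverseRecOn with
  | nil =>
    rw [List.countP_nil]
    rw [List.sum_eq_zero]
    · simp
    · intro y hy
      rcases List.mem_map.mp hy with ⟨u, hu, huy⟩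
      rw [← huy]
      simp [pvReps]
  | append_singleton M p ih =>
    obtain ⟨r, u0⟩ := p
    have hu0 : u0 ∈ U := hcov (r, u0) (by simp)
    have ih' := ih (fun q hq => hcov q (by simp [hq]))
    have hpt : ∀ u, (if C u = true then ((pvReps (M ++ [(r, u0)]) u).count x : Int) else 0)
        = (if C u = true then ((pvReps M u).count x : Int) else 0)
          + (if u = u0 then (if C u0 = true ∧ r = x then 1 else 0) else 0) := by
      intro u
      rw [reps_append]
      by_cases hu : u = u0
      · rw [if_pos hu, if_pos (hu ▸ rfl : u0 = u), ← hu]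
        by_cases hc : C u = true
        · rw [if_pos hc, if_pos hc, List.count_append]
          by_cases hx : r = x
          · rw [if_pos ⟨hu ▸ hc, hx⟩]
            subst hx
            simp
          · rw [if_neg (fun hh => hx hh.2)]
            have : (r == x) = false := by simpa using hx
            simp [List.count_cons, this]
        · rw [if_neg hc, if_neg hc, if_neg (fun hh => hc hh.1)]
          ring
      · rw [if_neg hu, if_neg (fun hh : u0 = u => hu hh.symm)]
        simp
    calc (U.map (fun u => if C u = true then ((pvReps (M ++ [(r, u0)]) u).count x : Int) else 0)).sum
        = (U.map (fun u => (if C u = true then ((pvReps M u).count x : Int) else 0)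
            + (if u = u0 then (if C u0 = true ∧ r = x then 1 else 0) else 0))).sum := by
          exact congrArg _ (List.map_congr_left (fun u _ => hpt u))
      _ = (M.countP (fun p => p.1 == x && C p.2) : Int) + (if C u0 = true ∧ r = x then 1 else 0) := by
          rw [sum_map_add, ih', sum_map_ite_eq U u0 _ hU hu0]
      _ = ((M ++ [(r, u0)]).countP (fun p => p.1 == x && C p.2) : Int) := by
          rw [List.countP_append, List.countP_cons, List.countP_nil]
          by_cases hc : C u0 = true <;> by_cases hx : r = x
          · rw [if_pos ⟨hc, hx⟩]; subst hx; simp [hc]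
          · rw [if_neg (fun hh => hx hh.2)]
            have : (r == x) = false := by simpa using hx
            simp [this]
          · rw [if_neg (fun hh => hc hh.1)]
            simp [hc]
          · rw [if_neg (fun hh => hc hh.1)]
            simp [hc]

theorem go_acc (sep : List Char) : ∀ (fuel : Nat) (l cur : List Char) (acc : List (List Char)),
    PySem.Chars.splitOn.go sep fuel l cur acc = acc.reverse ++ PySem.Chars.splitOn.go sep fuel l cur [] := by
  intro fuel
  induction fuel with
  | zero => intro l cur acc; rw [PySem.Chars.splitOn.go.eq_def, PySem.Chars.splitOn.go.eq_def]; simp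
  | succ fuel ih =>
    intro l cur acc
    rw [PySem.Chars.splitOn.go.eq_def]
    conv_rhs => rw [PySem.Chars.splitOn.go.eq_def]
    cases l with
    | nil => simp
    | cons c rest =>
      simp only
      by_cases h : sep.isPrefixOf (c :: rest) = true
      · rw [if_pos h, if_pos h, ih _ _ (cur.reverse :: acc), ih _ _ [cur.reverse]]
        simp
      · rw [if_neg h, if_neg h, ih rest (c :: cur) acc]

theorem go_ne_nil (sep : List Char) : ∀ (fuel : Nat) (l cur : List Char) (acc : List (List Char)),
    PySem.Chars.splitOn.go sep fuel l cur acc ≠ [] := by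
  intro fuel
  induction fuel with
  | zero => intro l cur acc; rw [PySem.Chars.splitOn.go.eq_def]; simp
  | succ fuel ih =>
    intro l cur acc
    rw [PySem.Chars.splitOn.go.eq_def]
    cases l with
    | nil => simp
    | cons c rest =>
      simp only
      by_cases h : sep.isPrefixOf (c :: rest) = true
      · rw [if_pos h]; exact ih _ _ _
      · rw [if_neg h]; exact ih _ _ _

theorem go_join (sep : List Char) (hsep : sep ≠ []) :
    ∀ (fuel : Nat) (l cur : List Char), l.length < fuel →
    PySem.Chars.join sep (PySem.Chars.splitOn.go sep fuel l cur []) = cur.reverse ++ l := by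
  intro fuel
  induction fuel with
  | zero => intro l cur h; omega
  | succ fuel ih =>
    intro l cur h
    rw [PySem.Chars.splitOn.go.eq_def]
    cases l with
    | nil => simp [PySem.Chars.join_singleton]
    | cons c rest =>
      simp only
      by_cases hp : sep.isPrefixOf (c :: rest) = true
      · rw [if_pos hp, go_acc]
        have hpre : sep <+: (c :: rest) := by
          exact List.isPrefixOf_iff_prefix.mp hp
        have hlen : sep.length ≤ (c :: rest).length := hpre.length_le
        have hslen : 1 ≤ sep.length := by
          cases sep with | nil => exact absurd rfl hsep | cons a s => simp
        have hdrop : (List.drop sep.length (c :: rest)).length < fuel := by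
          rw [List.length_drop]
          simp at h ⊢
          omega
        obtain ⟨y, r, hyr⟩ : ∃ y r, PySem.Chars.splitOn.go sep fuel (List.drop sep.length (c :: rest)) [] [] = y :: r := by
          cases hgo : PySem.Chars.splitOn.go sep fuel (List.drop sep.length (c :: rest)) [] [] with
          | nil => exact absurd hgo (go_ne_nil sep fuel _ [] [])
          | cons y r => exact ⟨y, r, rfl⟩
        have hjoin := ih (List.drop sep.length (c :: rest)) [] hdrop
        rw [hyr] at hjoin ⊢
        simp only [List.reverse_cons, List.reverse_nil, List.nil_append]
        rw [List.singleton_append, PySem.Chars.join_cons_cons, hjoin]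
        simp only [List.reverse_nil, List.nil_append]
        rw [List.append_assoc]
        congr 1
        obtain ⟨t, ht⟩ := hpre
        rw [← ht, List.drop_left]
      · rw [if_neg hp, ih rest (c :: cur) (by simpa using Nat.lt_of_succ_lt_succ (by simpa using h))]
        simp

theorem split_two (log a b : String) (h : PySem.Str.split? log " " = some [a, b]) :
    log.toList = a.toList ++ ' ' :: b.toList := by
  have hmap := PySem.Str.split?_map log " "
  rw [h] at hmap
  have hsep : (" " : String).toList = [' '] := rfl
  rw [hsep] at hmap
  rw [PySem.Chars.split?] at hmap
  rw [if_neg (by simp)] at hmap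
  have hsplit : PySem.Chars.splitOn log.toList [' '] = [a.toList, b.toList] := by
    simpa using hmap.symm
  have hj := go_join [' '] (by simp) (log.toList.length + 1) log.toList [] (by omega)
  rw [PySem.Chars.splitOn] at hsplit
  rw [hsplit] at hj
  rw [PySem.Chars.join_cons_cons, PySem.Chars.join_singleton] at hj
  simpa using hj.symm

theorem parse_eq (log : String) (h : ((PySem.Str.split? log " ").getD []).length = 2) :
    ∃ a b, pvParse log = (a, b) ∧ log.toList = a.toList ++ ' ' :: b.toList := by
  cases hs : PySem.Str.split? log " " with
  | none => rw [hs] at h; simp at h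
  | some parts =>
    rw [hs] at h
    simp only [Option.getD_some] at h
    match parts, h with
    | [a, b], _ =>
      refine ⟨a, b, ?_, split_two log a b hs⟩
      rw [pvParse, hs]
      rfl

theorem parse_inj (l1 l2 : String)
    (h1 : ((PySem.Str.split? l1 " ").getD []).length = 2)
    (h2 : ((PySem.Str.split? l2 " ").getD []).length = 2)
    (heq : pvParse l1 = pvParse l2) : l1 = l2 := by
  obtain ⟨a, b, hp1, hl1⟩ := parse_eq l1 h1
  obtain ⟨a', b', hp2, hl2⟩ := parse_eq l2 h2
  rw [hp1, hp2] at heq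
  have ha : a = a' := congrArg Prod.fst heq
  have hb : b = b' := congrArg Prod.snd heq
  apply String.toList_inj.mp
  rw [hl1, hl2, ha, hb]

theorem idx_getD (M : List (String × String)) (u : String) :
    (M.foldl (fun d p => d.modify p.2 PySem.Set.empty (fun s => PySem.Set.add s p.1))
        PySem.Dict.empty).getD u PySem.Set.empty = PySem.Set.ofList (pvReps M u) := by
  induction M using List.reverseRecOn with
  | nil => simp [pvReps, PySem.Set.ofList_nil, PySem.Dict.getD_empty]
  | append_singleton M p ih =>
    rw [List.foldl_append, List.foldl_cons, List.foldl_nil, PySem.Dict.getD_modify]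
    by_cases h : u = p.2
    · subst h
      simp only [ih, pvReps, List.filter_append, List.map_append]
      rw [List.filter_cons, if_pos (by simp), List.filter_nil]
      simp [PySem.Set.ofList_append_singleton]
    · rw [if_neg h, ih]
      have : pvReps (M ++ [p]) u = pvReps M u := by
        simp only [pvReps, List.filter_append]
        rw [List.filter_cons, if_neg (by simpa using fun hh => h hh.symm), List.filter_nil]
        simp
      rw [this]

theorem counts_getD (k : Int) (x : String) (l : List (PySem.Set String)) (c : PySem.Dict String Int) :
    (l.foldl (fun c reporters =>
        if k ≤ PySem.Set.len reporters then
          reporters.foldl (fun c reporter => c.insert reporter (c.getD reporter 0 + 1)) c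
        else c) c).getD x 0
      = c.getD x 0 + (l.map (fun s => if k ≤ PySem.Set.len s then ((s : List String).count x : Int) else 0)).sum := by
  induction l generalizing c with
  | nil => simp
  | cons s l ih =>
    rw [List.foldl_cons, ih, List.map_cons, List.sum_cons]
    by_cases h : k ≤ PySem.Set.len s
    · rw [if_pos h, if_pos h, PySem.Dict.getD_foldl_insert_add_one]
      ring
    · rw [if_neg h, if_neg h]
      ring

theorem reps_nodup (M : List (String × String)) (hM : M.Nodup) (u : String) :
    (pvReps M u).Nodup := by
  rw [pvReps]
  apply List.Nodup.map_on
  · intro q hq q' hq' h1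
    have h2 : q.2 = u := by simpa using List.of_mem_filter hq
    have h3 : q'.2 = u := by simpa using List.of_mem_filter hq'
    exact Prod.ext h1 (h2.trans h3.symm)
  · exact List.Nodup.filter _ hM

-- ===== VERDICT (by name: the statement is the Claim_ definition above) =====
theorem solution_spec : Claim_equal_solution := by
  intro id_list report k _hdom hpre
  unfold Spec_solution
  have hpre' : ∀ log ∈ report, ((PySem.Str.split? log " ").getD []).length = 2 := by
    intro log hlog
    have := List.all_eq_true.mp hpre log hlog
    simpa using this
  set logs := PySem.Set.ofList report with hlogs
  set M : List (String × String) := logs.map pvParse with hM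
  have hlogmem : ∀ log ∈ logs, ((PySem.Str.split? log " ").getD []).length = 2 := by
    intro log hlog
    exact hpre' log ((PySem.Set.mem_ofList report log).mp hlog)
  have hMnd : M.Nodup := by
    apply List.Nodup.map_on
    · intro l1 h1 l2 h2 heq
      exact parse_inj l1 l2 (hlogmem l1 h1) (hlogmem l2 h2) heq
    · exact PySem.Set.nodup_ofList report
  -- A's value at each id
  have hA : solution id_list report k
      = id_list.map (fun x => (pvCnt M k x : Int)) := by
    rw [solution]
    have hfold : logs.foldl (pvStepA k) (PySem.Dict.empty, PySem.Dict.empty)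
        = M.foldl (pvStepP k) (PySem.Dict.empty, PySem.Dict.empty) := by
      rw [hM, List.foldl_map]
      rfl
    rw [hfold]
    apply List.map_congr_left
    intro x _
    obtain ⟨-, iher⟩ := A_inv k M
    rw [iher x]
    by_cases h : (M.foldl (pvStepP k) (PySem.Dict.empty, PySem.Dict.empty)).2.contains x = true
    · rw [if_pos h]
    · rw [if_neg h]
      have h0 := PySem.Dict.getD_of_not_contains
        (M.foldl (pvStepP k) (PySem.Dict.empty, PySem.Dict.empty)).2 (ν := Int) 0
        (by simpa using h)
      rw [iher x] at h0
      exact h0.symm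
  -- B's value at each id
  have hB : solution_alt id_list report k
      = id_list.map (fun x => (pvCnt M k x : Int)) := by
    rw [solution_alt]
    have hfold : logs.foldl
        (fun d log => d.modify (pvParse log).2 PySem.Set.empty
          (fun s => PySem.Set.add s (pvParse log).1)) PySem.Dict.empty
        = M.foldl (fun d p => d.modify p.2 PySem.Set.empty
            (fun s => PySem.Set.add s p.1)) PySem.Dict.empty := by
      rw [hM, List.foldl_map]
    rw [hfold]
    set idx := M.foldl (fun d p => d.modify p.2 PySem.Set.empty
        (fun s => PySem.Set.add s p.1)) PySem.Dict.empty with hidx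
    have hkeys : idx.keys = PySem.Set.ofList (M.map Prod.snd) := by
      rw [hidx]
      rw [PySem.Dict.keys_foldl_modify_key M Prod.snd PySem.Set.empty
        (fun d p => fun s => PySem.Set.add s p.1) PySem.Dict.empty]
      rw [PySem.Dict.keys_empty, PySem.Set.update_nil_left]
    have hknd : idx.keys.Nodup := by
      rw [hidx]
      exact PySem.Dict.nodup_keys_foldl_modify_key M Prod.snd PySem.Set.empty
        (fun d p => fun s => PySem.Set.add s p.1) PySem.Dict.empty
        (by rw [PySem.Dict.keys_empty]; exact List.nodup_nil)
    have hvals : idx.values = idx.keys.map (fun u => PySem.Set.ofList (pvReps M u)) := by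
      rw [PySem.Dict.values_eq_map_keys idx hknd PySem.Set.empty]
      apply List.map_congr_left
      intro u _
      rw [hidx, idx_getD]
    apply List.map_congr_left
    intro x _
    rw [hvals, counts_getD, PySem.Dict.getD_empty, List.map_map]
    have hpt : ∀ u ∈ idx.keys,
        ((fun s => if k ≤ PySem.Set.len s then ((s : List String).count x : Int) else 0) ∘
          (fun u => PySem.Set.ofList (pvReps M u))) u
        = (fun u => if (decide (k ≤ (pvCntU M u : Int))) = true
            then (((pvReps M u).count x : Nat) : Int) else 0) u := by
      intro u _
      have hnd := reps_nodup M hMnd u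
      have hself : PySem.Set.ofList (pvReps M u) = pvReps M u :=
        PySem.Set.ofList_eq_self_of_nodup _ hnd
      have hlen : PySem.Set.len (PySem.Set.ofList (pvReps M u)) = (pvCntU M u : Int) := by
        rw [hself, PySem.Set.len, pvReps, pvCntU, List.length_map,
          ← List.countP_eq_length_filter]
      simp only [Function.comp_apply]
      rw [hlen, hself]
      by_cases h : k ≤ (pvCntU M u : Int) <;> simp [h]
    rw [List.map_congr_left hpt, hkeys]
    rw [sum_group x (fun u => decide (k ≤ (pvCntU M u : Int))) M
      (PySem.Set.ofList (M.map Prod.snd)) (PySem.Set.nodup_ofList _)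
      (fun p hp => (PySem.Set.mem_ofList _ _).mpr (List.mem_map.mpr ⟨p, hp, rfl⟩))]
    simp [pvCnt]
  rw [hA, hB]
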